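-- pv_equiv track=rewrite | github.com/matAlmeida/assembly-playground | compilador-de-assembly/compilator.py | int2hexstr
-- ===== SOURCE A (Python) =====
-- def int2hexstr(integer):
--     converted = ""
--
--     if integer < 0:
--         converted = hex(((abs(integer) ^ 0xffff) + 1)
--                         & 0xffff).split('x')[-1]
--     else:
--         converted = hex(integer).split('x')[-1]
--
--     if len(converted) % 2 != 0:
--         converted = "0" + converted
--
--     convertedList = list(converted)
--     abc = ""
--     size = len(converted)
--     i = 0
--     while i < size:
--         abc += convertedList.pop(-2)
--         abc += convertedList.pop(-1)
--         i += 2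
--
--     return abc
-- ===== SOURCE B (Python) =====
-- def int2hexstr(integer):
--     if integer < 0:
--         integer = ((-integer ^ 0xffff) + 1) & 0xffff
--     h = format(integer, 'x')
--     if len(h) % 2:
--         h = '0' + h
--     return bytes.fromhex(h)[::-1].hex()
-- ===== Notes on version B (the rewrite author's own statement) =====
-- stated objective: idiomatic
-- what changed: A's destructive while loop that pops characters from the end of a char list is replaced by a byte-level reversal: parse the even-length hex string with bytes.fromhex, reverse the bytes by slicing, and re-emit with .hex().
import Mathlib
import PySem

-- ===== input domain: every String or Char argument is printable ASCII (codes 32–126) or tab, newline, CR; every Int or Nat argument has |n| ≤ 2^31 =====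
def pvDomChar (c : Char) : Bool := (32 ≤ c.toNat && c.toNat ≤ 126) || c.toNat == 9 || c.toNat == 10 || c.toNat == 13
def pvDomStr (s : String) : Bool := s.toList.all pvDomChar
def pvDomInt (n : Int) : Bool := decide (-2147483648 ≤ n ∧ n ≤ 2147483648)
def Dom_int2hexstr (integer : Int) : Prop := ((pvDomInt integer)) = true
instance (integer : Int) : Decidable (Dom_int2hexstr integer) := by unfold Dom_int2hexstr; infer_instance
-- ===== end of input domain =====

-- B replaces A's destructive pop-from-the-end loop by chunking the hex string into
-- byte pairs and reversing them (bytes.fromhex(h)[::-1].hex()); objective: idiomatic.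

-- ===== PORT A =====
-- the while loop: abc += convertedList.pop(-2); abc += convertedList.pop(-1); i += 2
def aLoop (l : List Char) (abc : List Char) (i size : Nat) : List Char :=
  if i < size then
    match PySem.List.pop? l (-2) with
    | some (c1, l1) =>
      (match PySem.List.pop? l1 (-1) with
       | some (c2, l2) => aLoop l2 (abc ++ [c1, c2]) (i + 2) size
       | none => abc ++ [c1])   -- Python would raise IndexError; unreachable (even length)
    | none => abc               -- Python would raise IndexError; unreachable
  else abc
termination_by size - i

-- hex(n).split('x')[-1] for n ≥ 0 = lowercase hex digits = Nat.toDigits 16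
def int2hexstr (integer : Int) : String :=
  let converted : List Char :=
    if integer < 0 then
      Nat.toDigits 16 (((integer.natAbs ^^^ 0xffff) + 1) &&& 0xffff)
    else
      Nat.toDigits 16 integer.toNat
  let converted := if converted.length % 2 ≠ 0 then '0' :: converted else converted
  String.mk (aLoop converted [] 0 converted.length)

-- ===== PORT B =====
-- bytes.fromhex groups the (even-length, lowercase) hex string into byte pairs;
-- [::-1] reverses them; .hex() writes the pairs back out.
def toPairs : List Char → List (Char × Char)
  | a :: b :: rest => (a, b) :: toPairs rest
  | _ => []

def int2hexstr_alt (integer : Int) : String :=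
  let h : List Char :=
    if integer < 0 then
      Nat.toDigits 16 ((((-integer).toNat ^^^ 0xffff) + 1) &&& 0xffff)
    else
      Nat.toDigits 16 integer.toNat
  let h := if h.length % 2 ≠ 0 then '0' :: h else h
  String.mk ((toPairs h).reverse.flatMap fun p => [p.1, p.2])

-- ===== PRECONDITION & SPEC =====
def Spec_int2hexstr (integer : Int) (out : String) : Prop := out = int2hexstr_alt integer
instance (integer : Int) (out : String) : Decidable (Spec_int2hexstr integer out) := by unfold Spec_int2hexstr; infer_instance

-- ===== CLAIM (what is proved, stated in full; the proofs are below) =====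
def Claim_equal_int2hexstr : Prop := ∀ (integer : Int), Dom_int2hexstr integer → Spec_int2hexstr integer (int2hexstr integer)

-- ===== LEMMAS AND PROOFS =====

theorem pop_neg2 (l : List Char) (a b : Char) :
    PySem.List.pop? (l ++ [a, b]) (-2) = some (a, l ++ [b]) := by
  simp [PySem.List.pop?, PySem.List.pyIdx?]
  rw [List.eraseIdx_append, if_neg (by omega)]
  simp

theorem pop_neg1 (l : List Char) (b : Char) :
    PySem.List.pop? (l ++ [b]) (-1) = some (b, l) := by
  simp [PySem.List.pop?, PySem.List.pyIdx?]
  rw [List.eraseIdx_append, if_neg (by omega)]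
  simp

theorem toPairs_append : ∀ (l : List Char) (a b : Char), l.length % 2 = 0 →
    toPairs (l ++ [a, b]) = toPairs l ++ [(a, b)]
  | [], _, _, _ => rfl
  | [x], _, _, h => by simp at h
  | x :: y :: rest, a, b, h => by
      simp only [List.cons_append, toPairs]
      rw [toPairs_append rest a b (by simp at h; omega)]

theorem aLoop_eq (n : Nat) : ∀ (l abc : List Char) (i size : Nat),
    l.length = 2 * n → i + 2 * n = size →
    aLoop l abc i size = abc ++ ((toPairs l).reverse.flatMap fun p => [p.1, p.2]) := by
  induction n with
  | zero =>
      intro l abc i size hl hsz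
      have h0 : l = [] := List.length_eq_zero_iff.mp (by omega)
      subst h0
      rw [aLoop, if_neg (by omega)]
      simp [toPairs]
  | succ n ih =>
      intro l abc i size hl hsz
      rcases l.eq_nil_or_concat with rfl | ⟨m, b, rfl⟩
      · simp at hl
      rcases m.eq_nil_or_concat with rfl | ⟨l', a, rfl⟩
      · simp at hl; omega
      have hl' : l'.length = 2 * n := by
        simp [List.concat_eq_append] at hl; omega
      have hA : (l'.concat a).concat b = l' ++ [a, b] := by simp
      rw [hA, aLoop, if_pos (by omega)]
      simp only [pop_neg2, pop_neg1]
      rw [ih l' (abc ++ [a, b]) (i + 2) size hl' (by omega),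
          toPairs_append l' a b (by omega)]
      simp

theorem padded_even (l : List Char) :
    (if l.length % 2 ≠ 0 then '0' :: l else l).length % 2 = 0 := by
  by_cases h : l.length % 2 ≠ 0 <;> simp [h] <;> omega

theorem core_pad (x : List Char) :
    String.mk (aLoop (if x.length % 2 ≠ 0 then '0' :: x else x) [] 0
        (if x.length % 2 ≠ 0 then '0' :: x else x).length) =
    String.mk (((toPairs (if x.length % 2 ≠ 0 then '0' :: x else x)).reverse.flatMap
        fun p => [p.1, p.2])) := by
  have hev := padded_even x
  generalize hL : (if x.length % 2 ≠ 0 then '0' :: x else x) = L at *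
  rw [aLoop_eq (L.length / 2) L [] 0 L.length (by omega) (by omega)]
  simp

-- ===== VERDICT (by name: the statement is the Claim_ definition above) =====
theorem int2hexstr_spec : Claim_equal_int2hexstr := by
  intro integer _
  show int2hexstr integer = int2hexstr_alt integer
  have hbranch :
      (if integer < 0 then
        Nat.toDigits 16 (((integer.natAbs ^^^ 65535) + 1) &&& 65535)
       else Nat.toDigits 16 integer.toNat)
      = (if integer < 0 then
          Nat.toDigits 16 ((((-integer).toNat ^^^ 65535) + 1) &&& 65535)
         else Nat.toDigits 16 integer.toNat) := by
    by_cases hneg : integer < 0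
    · rw [if_pos hneg, if_pos hneg, show integer.natAbs = (-integer).toNat by omega]
    · rw [if_neg hneg, if_neg hneg]
  unfold int2hexstr int2hexstr_alt
  rw [hbranch]
  exact core_pad _
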